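-- pv_equiv track=rewrite | github.com/HuyaneMatsu/hata | build/lib/hata/ext/slash/converters.py | preprocess_channel_types
-- ===== SOURCE A (Python) =====
-- def preprocess_channel_types(channel_types):
--     """
--     Preprocesses the given channel type values.
--
--     Parameters
--     ----------
--     channel_types : `None`, `iterable` of `int`
--         Channel types to limit a slash command parameter to.
--
--     Returns
--     -------
--     processed_channel_types : `None`, `tuple` of `int`
--
--     Raises
--     ------
--     TypeError
--         If `channel_types` is neither `None` nor `iterable` of `int`.
--     ValueError
--         If received `channel_types` from both `type_or_choice` and `channel_types` parameters.
--     """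
--     if (channel_types is None):
--         processed_channel_types = None
--     else:
--         processed_channel_types = None
--
--         iterator = getattr(type(channel_types), '__iter__', None)
--         if (iterator is None):
--             raise TypeError(
--                 f'`channel_types` can be `None`, `iterable`, got '
--                 f'{channel_types.__class__.__anme__}; {channel_types!r}.'
--             )
--
--         for channel_type in iterator(channel_types):
--             if type(channel_type) is int:
--                 pass
--             elif isinstance(channel_type, int):
--                 channel_type = int(channel_type)
--             else:
--                 raise TypeError(
--                     f'`channel_types` can contain `int` elements, got '
--                     f'{channel_type.__class__.__name__}; {channel_type!r}; channel_types={channel_types!r}.'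
--                 )
--
--             if processed_channel_types is None:
--                 processed_channel_types = set()
--
--             processed_channel_types.add(channel_type)
--
--         if processed_channel_types:
--             processed_channel_types = tuple(sorted(processed_channel_types))
--         else:
--             processed_channel_types = None
--
--     return processed_channel_types
-- ===== SOURCE B (Python) =====
-- def preprocess_channel_types(channel_types):
--     if channel_types is None:
--         return None
--
--     collected = []
--     for channel_type in channel_types:
--         if type(channel_type) is int:
--             pass
--         elif isinstance(channel_type, int):
--             channel_type = int(channel_type)
--         else:
--             raise TypeError(
--                 f'`channel_types` can contain `int` elements, got '
--                 f'{channel_type.__class__.__name__}; {channel_type!r}; channel_types={channel_types!r}.'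
--             )
--         collected.append(channel_type)
--
--     if not collected:
--         return None
--
--     collected.sort()
--     result = [collected[0]]
--     for value in collected[1:]:
--         if value != result[-1]:
--             result.append(value)
--     return tuple(result)
-- ===== Notes on version B (the rewrite author's own statement) =====
-- stated objective: alternative
-- what changed: Replaces the incremental hash-set dedup (add each validated int to a set, then sort the set) by collecting all validated ints into a list, sorting it once, and eliminating duplicates in a single adjacent-compare pass over the sorted list.
import Mathlib
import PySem

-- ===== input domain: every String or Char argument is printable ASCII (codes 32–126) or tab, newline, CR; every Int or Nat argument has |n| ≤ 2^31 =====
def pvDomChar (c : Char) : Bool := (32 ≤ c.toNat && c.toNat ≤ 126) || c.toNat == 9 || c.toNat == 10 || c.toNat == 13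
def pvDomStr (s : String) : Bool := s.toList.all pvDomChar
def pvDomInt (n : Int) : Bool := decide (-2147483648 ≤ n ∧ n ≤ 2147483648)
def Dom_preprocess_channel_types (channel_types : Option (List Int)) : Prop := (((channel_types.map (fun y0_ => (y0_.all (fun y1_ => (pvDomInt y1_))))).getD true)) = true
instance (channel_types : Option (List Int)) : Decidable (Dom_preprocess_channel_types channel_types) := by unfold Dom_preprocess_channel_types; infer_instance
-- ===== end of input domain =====

-- B collects validated ints into a list, sorts once, and removes duplicates by one
-- adjacent-compare pass, instead of A's incremental set-dedup followed by sorting (alternative decomposition).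


-- ===== PORT A =====
-- A: state is `None` or the set built so far; every element is an `Int` already
-- (the `type is int` / `isinstance` branches are identities on the Int domain),
-- so the loop just feeds each element into the set.
def preprocess_channel_types (channel_types : Option (List Int)) : Option (List Int) :=
  match channel_types with
  | none => none
  | some xs =>
    let st : Option (PySem.Set Int) :=
      xs.foldl (fun acc x =>
        match acc with
        | none => some (PySem.Set.add PySem.Set.empty x)
        | some s => some (PySem.Set.add s x)) none
    match st with
    | none => none
    | some s => if s.isEmpty then none else some (PySem.List.sorted s (fun x => x) false)

-- ===== PORT B =====
-- B's inner loop: `result = [head]; for value in rest: if value != result[-1]: result.append(value)`,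
-- transcribed as structural recursion carrying `prev = result[-1]`.
def pvDedupAdj : Int → List Int → List Int
  | _, [] => []
  | prev, v :: rest => if v ≠ prev then v :: pvDedupAdj v rest else pvDedupAdj prev rest

def preprocess_channel_types_alt (channel_types : Option (List Int)) : Option (List Int) :=
  match channel_types with
  | none => none
  | some xs =>
    -- the validation loop appends each element to `collected`; on Int input collected = xs
    let collected := xs
    if collected.isEmpty then none
    else
      match PySem.List.sorted collected (fun x => x) false with
      | [] => none   -- unreachable: sorting a non-empty list is non-empty
      | h :: t => some (h :: pvDedupAdj h t)

-- ===== PRECONDITION & SPEC =====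
def Spec_preprocess_channel_types (channel_types : Option (List Int)) (out : Option (List Int)) : Prop := out = preprocess_channel_types_alt channel_types
instance (channel_types : Option (List Int)) (out : Option (List Int)) : Decidable (Spec_preprocess_channel_types channel_types out) := by unfold Spec_preprocess_channel_types; infer_instance

-- ===== CLAIM (what is proved, stated in full; the proofs are below) =====
def Claim_equal_preprocess_channel_types : Prop := ∀ (channel_types : Option (List Int)), Dom_preprocess_channel_types channel_types → Spec_preprocess_channel_types channel_types (preprocess_channel_types channel_types)

-- ===== LEMMAS AND PROOFS =====

-- A's loop over a non-empty list builds exactly set(xs).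
theorem pvFoldA_eq_ofList (xs : List Int) (s : PySem.Set Int) :
    xs.foldl (fun (acc : Option (PySem.Set Int)) x =>
      match acc with
      | none => some (PySem.Set.add PySem.Set.empty x)
      | some s => some (PySem.Set.add s x)) (some s)
      = some (xs.foldl PySem.Set.add s) := by
  induction xs generalizing s with
  | nil => rfl
  | cons y ys ih => simpa using ih (PySem.Set.add s y)

theorem pvFoldA_none (x : Int) (xs : List Int) :
    (x :: xs).foldl (fun (acc : Option (PySem.Set Int)) x =>
      match acc with
      | none => some (PySem.Set.add PySem.Set.empty x)
      | some s => some (PySem.Set.add s x)) none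
      = some (PySem.Set.ofList (x :: xs)) := by
  simp only [List.foldl_cons]
  rw [pvFoldA_eq_ofList]
  rfl

-- the adjacent-dedup of a sorted tail keeps exactly the members and is strictly increasing
theorem pvDedupAdj_spec (rest : List Int) : ∀ (prev : Int),
    (∀ y ∈ rest, prev ≤ y) → rest.Pairwise (· ≤ ·) →
    (∀ x, x ∈ prev :: pvDedupAdj prev rest ↔ x ∈ prev :: rest) ∧
      (prev :: pvDedupAdj prev rest).Pairwise (· < ·) := by
  induction rest with
  | nil => intro prev _ _; exact ⟨fun x => Iff.rfl, by simp [pvDedupAdj]⟩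
  | cons v rest ih =>
    intro prev h1 h2
    have hpv : prev ≤ v := h1 v (by simp)
    have h2' : rest.Pairwise (· ≤ ·) := h2.of_cons
    have hv1 : ∀ y ∈ rest, v ≤ y := fun y hy => List.rel_of_pairwise_cons h2 hy
    by_cases hvp : v = prev
    · subst hvp
      have := ih v (fun y hy => hv1 y hy) h2'
      rw [show pvDedupAdj v (v :: rest) = pvDedupAdj v rest by
        simp [pvDedupAdj]]
      constructor
      · intro x
        rw [show (x ∈ v :: pvDedupAdj v rest ↔ x ∈ v :: rest) from this.1 x]
        simp
      · exact this.2
    · have hlt : prev < v := lt_of_le_of_ne hpv (fun h => hvp h.symm)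
      have := ih v hv1 h2'
      rw [show pvDedupAdj prev (v :: rest) = v :: pvDedupAdj v rest by
        simp [pvDedupAdj, hvp]]
      constructor
      · intro x
        constructor
        · intro hx
          rcases List.mem_cons.mp hx with h | h
          · simp [h]
          · have := (this.1 x).mp h
            simp_all [List.mem_cons]
        · intro hx
          rcases List.mem_cons.mp hx with h | h
          · simp [h]
          · exact List.mem_cons.mpr (Or.inr ((this.1 x).mpr h))
      · refine List.pairwise_cons.mpr ⟨?_, this.2⟩
        intro y hy
        have hy' := (this.1 y).mp hy
        rcases List.mem_cons.mp hy' with h | h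
        · omega
        · exact lt_of_lt_of_le hlt (hv1 y h)

theorem pvMain (x : Int) (xs : List Int) :
    preprocess_channel_types (some (x :: xs)) = preprocess_channel_types_alt (some (x :: xs)) := by
  have hs : PySem.List.sorted (x :: xs) (fun a => a) false ≠ [] := by
    intro h
    have := (PySem.List.sorted_eq_nil_iff (xs := x :: xs) (key := fun a => a) (rev := false)).mp h
    simp at this
  obtain ⟨h, t, hht⟩ : ∃ h t, PySem.List.sorted (x :: xs) (fun a => a) false = h :: t := by
    cases hx : PySem.List.sorted (x :: xs) (fun a => a) false with
    | nil => exact absurd hx hs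
    | cons a b => exact ⟨a, b, rfl⟩
  -- B's value
  have hB : preprocess_channel_types_alt (some (x :: xs)) = some (h :: pvDedupAdj h t) := by
    simp only [preprocess_channel_types_alt, List.isEmpty_cons, hht]
    rfl
  -- A's value
  have hA : preprocess_channel_types (some (x :: xs))
      = some (PySem.List.sorted (PySem.Set.ofList (x :: xs)) (fun a => a) false) := by
    simp only [preprocess_channel_types, pvFoldA_none]
    have hne : ¬ (PySem.Set.ofList (x :: xs)).isEmpty := by
      have : x ∈ PySem.Set.ofList (x :: xs) := by
        rw [PySem.Set.mem_ofList]; simp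
      intro hemp
      rw [List.isEmpty_iff] at hemp
      simp [hemp] at this
    simp [hne]
  rw [hA, hB]
  -- characterise sorted(set(xs)) as h :: pvDedupAdj h t
  have hsp : (PySem.List.sorted (x :: xs) (fun a => a) false).Pairwise (· ≤ ·) := by
    have := PySem.List.sorted_pairwise (xs := x :: xs) (key := fun a => a)
    simpa using this
  rw [hht] at hsp
  have h1 : ∀ y ∈ t, h ≤ y := fun y hy => List.rel_of_pairwise_cons hsp hy
  have h2 : t.Pairwise (· ≤ ·) := hsp.of_cons
  obtain ⟨hmem, hpw⟩ := pvDedupAdj_spec t h h1 h2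
  -- membership of the dedup list = membership of xs
  have hmem' : ∀ y, y ∈ h :: pvDedupAdj h t ↔ y ∈ x :: xs := by
    intro y
    rw [hmem y, ← hht, PySem.List.mem_sorted]
  -- perm with the set
  have hperm : (h :: pvDedupAdj h t).Perm (PySem.Set.ofList (x :: xs)) := by
    apply List.perm_of_nodup_nodup_toFinset_eq hpw.nodup (PySem.Set.nodup_ofList _)
    ext y
    simp only [List.mem_toFinset, PySem.Set.mem_ofList]
    exact hmem' y
  congr 1
  exact PySem.List.sorted_eq_of_perm_of_pairwise_lt _ _ _ hperm hpw

-- ===== VERDICT (by name: the statement is the Claim_ definition above) =====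
theorem preprocess_channel_types_spec : Claim_equal_preprocess_channel_types := by
  intro ct _
  unfold Spec_preprocess_channel_types
  match ct with
  | none => rfl
  | some [] => rfl
  | some (x :: xs) => exact pvMain x xs
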